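-- pv_equiv track=rewrite | github.com/igotyabingo/codingtest | Python3/프로그래머스/2/389479. 서버 증설 횟수/서버 증설 횟수.py | solution
-- ===== SOURCE A (Python) =====
-- from collections import deque
--
-- def solution(players, m, k):
--     # deque를 이용해 sliding window 구현
--     window = deque(maxlen = k)
--     for _ in range(k):
--         window.append(0)
--
--     answer = 0
--     for p in players:
--         window.append(0)
--         tmp = p // m
--         s = sum(window)
--         if s < tmp:
--             window[-1] = tmp - s
--             answer += tmp - s
--
--     return answer
-- ===== SOURCE B (Python) =====
-- def solution(players, m, k):
--     # Event-driven: each hired batch is scheduled to expire k steps later.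
--     # No window is kept; only the active-server count and an expiry-event map.
--     expire = {}
--     active = 0
--     answer = 0
--     for i, p in enumerate(players):
--         active -= expire.pop(i, 0)
--         need = p // m - active
--         if need > 0:
--             answer += need
--             active += need
--             expire[i + k] = need
--     return answer
-- ===== Notes on version B (the rewrite author's own statement) =====
-- stated objective: faster
-- what changed: B keeps no window at all: it maintains an active-server count and a dict of expiry events (index -> servers shutting down there), decrementing the count when a batch expires, instead of A's deque window that is re-summed with sum(window) at every step.
-- outside the precondition, e.g. on solution([0], 1, 0): A returns 0, B returns 0; on solution([2], 1, 0): A raises IndexError, B returns 2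
import Mathlib
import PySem

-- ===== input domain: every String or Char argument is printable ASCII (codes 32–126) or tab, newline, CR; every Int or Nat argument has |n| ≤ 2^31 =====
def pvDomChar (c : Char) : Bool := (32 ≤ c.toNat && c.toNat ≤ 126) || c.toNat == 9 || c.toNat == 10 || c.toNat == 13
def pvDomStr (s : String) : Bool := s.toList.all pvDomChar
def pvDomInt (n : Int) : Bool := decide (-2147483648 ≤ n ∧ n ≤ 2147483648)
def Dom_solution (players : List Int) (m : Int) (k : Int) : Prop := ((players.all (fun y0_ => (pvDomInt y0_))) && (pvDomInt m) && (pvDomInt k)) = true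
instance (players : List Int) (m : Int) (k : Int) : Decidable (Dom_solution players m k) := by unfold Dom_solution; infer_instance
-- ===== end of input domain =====

-- B keeps no sliding window: instead of A's deque re-summed with sum(window) each step,
-- B tracks the active-server count plus a dict of expiry events; objective: faster.

-- ===== PORT A =====
-- deque with maxlen k, stored right-to-left (newest element first): append = cons,
-- and when full the leftmost (oldest) element, here the last, is dropped — exact
-- deque.append semantics, O(1) per append
def dqAppend (w : List Int × Nat) (x : Int) (k : Int) : List Int × Nat :=
  if (w.2 : Int) < k then (x :: w.1, w.2 + 1) else (x :: w.1.dropLast, w.2)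

def stepA (m k : Int) (st : (List Int × Nat) × Int) (p : Int) : (List Int × Nat) × Int :=
  let w := dqAppend st.1 0 k
  let tmp := PySem.Int.floordiv p m
  let s := w.1.foldl (· + ·) 0
  -- window[-1] = tmp - s: the newest slot is the head in this representation
  if s < tmp then (((tmp - s) :: w.1.tail, w.2), st.2 + (tmp - s)) else (w, st.2)

def solution (players : List Int) (m : Int) (k : Int) : Int :=
  let window := (PySem.List.pyRange 0 k 1).foldl (fun w _ => dqAppend w 0 k) ([], 0)
  (players.foldl (stepA m k) (window, 0)).2

-- ===== PORT B =====
-- state: (expire : expiry-event dict, active, answer); ip = (index, player)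
-- expire.pop(ip.1, 0) is ported as getD then erase
def stepB (m k : Int) (st : PySem.Dict Int Int × Int × Int) (ip : Int × Int) :
    PySem.Dict Int Int × Int × Int :=
  let active := st.2.1 - st.1.getD ip.1 0
  let d := st.1.erase ip.1
  let need := PySem.Int.floordiv ip.2 m - active
  if need > 0 then (d.insert (ip.1 + k) need, active + need, st.2.2 + need)
  else (d, active, st.2.2)

def solution_alt (players : List Int) (m : Int) (k : Int) : Int :=
  ((PySem.List.enumerate players 0).foldl (stepB m k) (PySem.Dict.mk [], 0, 0)).2.2

-- ===== PRECONDITION & SPEC =====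
-- Pre_ excludes m = 0 (A raises ZeroDivisionError) and k ≤ 0 (A raises ValueError for
-- negative k; for k = 0 A raises IndexError as soon as some p // m is positive, and
-- returns only in the degenerate all-nonpositive-demand case).
def Pre_solution (players : List Int) (m : Int) (k : Int) : Prop := m ≠ 0 ∧ 1 ≤ k
instance (players : List Int) (m : Int) (k : Int) : Decidable (Pre_solution players m k) := by unfold Pre_solution; infer_instance

def pvWitness_solution : List Int × Int × Int := ([3, 7, 1], 2, 2)

def Spec_solution (players : List Int) (m : Int) (k : Int) (out : Int) : Prop := out = solution_alt players m k
instance (players : List Int) (m : Int) (k : Int) (out : Int) : Decidable (Spec_solution players m k out) := by unfold Spec_solution; infer_instance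

-- ===== CLAIM (what is proved, stated in full; the proofs are below) =====
def Claim_equal_solution : Prop := ∀ (players : List Int) (m : Int) (k : Int), Dom_solution players m k → Pre_solution players m k → Spec_solution players m k (solution players m k)

-- ===== LEMMAS AND PROOFS =====

-- B's expiry dict after `adds.length` steps, seen "at time i": one event per past step s
-- that hired a positive batch whose expiry s+k has not passed time i yet
def Dwin (k i : Int) (adds : List Int) : List (Int × Int) :=
  (List.range adds.length).filterMap (fun (s : Nat) =>
    if i ≤ (s : Int) + k ∧ 0 < adds.getD s 0 then some (((s : Int) + k, adds.getD s 0)) else none)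

-- ghost-indexed relation between A's state (window, count, answer) and B's (dict, active,
-- answer): adds is the per-step addition history (0 where nothing was hired)
def BRel (k : Int) (adds : List Int) (stA : (List Int × Nat) × Int)
    (stB : PySem.Dict Int Int × Int × Int) : Prop :=
  (∀ x ∈ adds, 0 ≤ x) ∧
  stA.1.1 = (adds.reverse ++ List.replicate k.toNat 0).take k.toNat ∧
  stA.1.2 = k.toNat ∧
  stB.1 = PySem.Dict.mk (Dwin k (adds.length : Int) adds) ∧
  stB.2.1 = stA.1.1.sum ∧
  stA.2 = stB.2.2

theorem init_window (k : Int) (l : List Int) (wl : List Int)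
    (h : wl.length + l.length ≤ k.toNat) :
    l.foldl (fun w _ => dqAppend w 0 k) (wl, wl.length)
      = (List.replicate l.length 0 ++ wl, wl.length + l.length) := by
  induction l generalizing wl with
  | nil => simp
  | cons x xs ih =>
    simp only [List.foldl_cons, List.length_cons]
    have hlt : ((wl.length : Nat) : Int) < k := by simp at h; omega
    rw [show dqAppend (wl, wl.length) 0 k = (0 :: wl, (0 :: wl).length) by
      simp [dqAppend, hlt]]
    rw [ih (0 :: wl) (by simp at h ⊢; omega)]
    simp [List.replicate_succ']
    omega

theorem foldl_add_eq_sum (l : List Int) : l.foldl (· + ·) 0 = l.sum :=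
  (l.sum_eq_foldl).symm

theorem take_concat_getElem (L : List Int) (K : Nat) (hK : 1 ≤ K) (h : K - 1 < L.length) :
    L.take K = L.take (K - 1) ++ [L[K - 1]'h] := by
  conv_lhs => rw [show K = (K - 1) + 1 by omega]
  rw [List.take_succ]
  simp [List.getElem?_eq_getElem h]

theorem take_cons_pred (v : Int) (L : List Int) (K : Nat) (hK : 1 ≤ K) :
    (v :: L).take K = v :: L.take (K - 1) := by
  conv_lhs => rw [show K = (K - 1) + 1 by omega]
  rw [List.take_succ_cons]

theorem find?_Dwin_none (k i : Int) (adds : List Int) (key : Int) (l : List Nat)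
    (hl : ∀ s ∈ l, (s : Int) + k ≠ key) :
    (l.filterMap (fun (s : Nat) =>
        if i ≤ (s : Int) + k ∧ 0 < adds.getD s 0 then some (((s : Int) + k, adds.getD s 0)) else none)).find?
      (fun pr => pr.1 == key) = none := by
  apply List.find?_eq_none.mpr
  intro pr hpr
  obtain ⟨s, hs, hf⟩ := List.mem_filterMap.mp hpr
  split_ifs at hf with h
  · cases hf
    simpa using hl s hs

-- lookup of the expiring key in B's dict = A's expiring window slot
theorem getD_Dwin (k : Int) (hk : 1 ≤ k) (adds : List Int) (hnn : ∀ x ∈ adds, 0 ≤ x) :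
    (PySem.Dict.mk (Dwin k (adds.length : Int) adds)).getD (adds.length : Int) 0
      = (if (adds.length : Int) ≥ k then PySem.List.pyGetD adds ((adds.length : Int) - k) 0 else 0) := by
  rw [PySem.Dict.getD, PySem.Dict.get?]
  show ((List.find? (fun pr => pr.1 == (adds.length : Int)) (Dwin k (adds.length : Int) adds)).map
      (fun x => x.2)).getD 0 = _
  by_cases hge : k ≤ (adds.length : Int)
  · -- j = position of the expiring addition
    set n := adds.length with hn
    have hj : k.toNat ≤ n := by omega
    set j := n - k.toNat with hjdef
    have hjn : j < n := by omega
    have hjk : (j : Int) + k = (n : Int) := by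
      have : (j : Int) = (n : Int) - k := by rw [hjdef]; push_cast [hj]; omega
      omega
    have hsplit : List.range n = (List.range j ++ [j]) ++
        (List.range (n - (j + 1))).map ((j + 1) + ·) := by
      rw [← List.range_succ, ← List.range_add]
      congr 1
      omega
    have hpy : PySem.List.pyGetD adds ((n : Int) - k) 0 = adds.getD j 0 := by
      rw [PySem.List.pyGetD_eq_getElem adds 0 (by omega) (by omega)]
      rw [List.getD_eq_getElem _ _ hjn]
      congr 1
      omega
    rw [if_pos hge]
    show ((List.find? _ (Dwin k (n : Int) adds)).map (fun x => x.2)).getD 0 = _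
    rw [Dwin, ← hn, hsplit]
    rw [List.filterMap_append, List.filterMap_append, List.find?_append, List.find?_append]
    rw [find?_Dwin_none k _ adds _ (List.range j) (by intro s hs; have := List.mem_range.mp hs; omega)]
    rw [find?_Dwin_none k _ adds _ ((List.range (n - (j + 1))).map ((j + 1) + ·))
      (by intro s hs; obtain ⟨t, ht, rfl⟩ := List.mem_map.mp hs; omega)]
    simp only [Option.none_or, Option.or_none]
    by_cases hpos : 0 < adds.getD j 0
    · rw [show (List.filterMap (fun (s : Nat) =>
          if (n : Int) ≤ (s : Int) + k ∧ 0 < adds.getD s 0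
          then some (((s : Int) + k, adds.getD s 0)) else none) [j])
          = [((j : Int) + k, adds.getD j 0)] by
        simp only [List.filterMap_cons, List.filterMap_nil]
        rw [if_pos ⟨by omega, hpos⟩]]
      rw [List.find?_cons_of_pos (by simp [hjk])]
      simp [hpy]
    · have haj : 0 ≤ adds.getD j 0 := by
        rw [List.getD_eq_getElem _ _ hjn]
        exact hnn _ (List.getElem_mem _)
      have hz : adds.getD j 0 = 0 := by omega
      rw [show (List.filterMap (fun (s : Nat) =>
          if (n : Int) ≤ (s : Int) + k ∧ 0 < adds.getD s 0
          then some (((s : Int) + k, adds.getD s 0)) else none) [j]) = [] by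
        simp only [List.filterMap_cons, List.filterMap_nil]
        rw [if_neg (by rw [hz]; rintro ⟨-, h⟩; omega)]]
      simp only [List.find?_nil, Option.map_none, Option.getD_none]
      rw [hpy]
      exact hz.symm
  · rw [if_neg (by omega)]
    rw [Dwin, find?_Dwin_none k _ adds _ (List.range adds.length)
      (by intro s hs; omega)]
    rfl

-- popping the expiring key advances the dict's "time" by one
theorem erase_Dwin (k : Int) (adds : List Int) :
    (PySem.Dict.mk (Dwin k (adds.length : Int) adds)).erase (adds.length : Int)
      = PySem.Dict.mk (Dwin k ((adds.length : Int) + 1) adds) := by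
  apply PySem.Dict.ext
  simp only [PySem.Dict.erase, Dwin, List.filter_filterMap]
  apply List.filterMap_congr
  intro s _
  split_ifs with h1 h2 h3
  · have hne : (s : Int) + k ≠ (adds.length : Int) := by omega
    simp [Option.filter_some, hne]
  · have heq : (s : Int) + k = (adds.length : Int) := by omega
    simp [Option.filter_some, heq]
  · exact absurd ⟨by omega, h3.2⟩ h1
  · rfl

-- scheduling the fresh batch's expiry appends one event = extending the history by need
theorem insert_Dwin (k : Int) (hk : 1 ≤ k) (adds : List Int) (v : Int) (hv : 0 < v) :
    (PySem.Dict.mk (Dwin k ((adds.length : Int) + 1) adds)).insert ((adds.length : Int) + k) v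
      = PySem.Dict.mk (Dwin k (((adds ++ [v]).length : Int)) (adds ++ [v])) := by
  have hcont : (PySem.Dict.mk (Dwin k ((adds.length : Int) + 1) adds)).contains
      ((adds.length : Int) + k) = false := by
    simp only [PySem.Dict.contains, List.any_eq_false, Dwin]
    intro pr hpr
    obtain ⟨s, hs, hf⟩ := List.mem_filterMap.mp hpr
    have hs' := List.mem_range.mp hs
    split_ifs at hf with h
    · cases hf
      have hne : (s : Int) + k ≠ (adds.length : Int) + k := by omega
      simpa using hne
  apply PySem.Dict.ext
  rw [PySem.Dict.insert, hcont]
  simp only [Bool.false_eq_true, if_false]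
  show Dwin k ((adds.length : Int) + 1) adds ++ [((adds.length : Int) + k, v)]
      = Dwin k (((adds ++ [v]).length : Int)) (adds ++ [v])
  simp only [Dwin, List.length_append, List.length_cons, List.length_nil, zero_add,
    List.range_succ, List.filterMap_append, List.filterMap_cons, List.filterMap_nil]
  have h0 : (adds ++ [v]).getD adds.length 0 = v := by simp
  rw [h0]
  rw [show ((adds.length + 1 : Nat) : Int) = (adds.length : Int) + 1 by push_cast; ring]
  rw [if_pos ⟨by omega, hv⟩]
  congr 1
  apply List.filterMap_congr
  intro s hs
  rw [List.getD_append _ _ _ _ (List.mem_range.mp hs)]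

-- a step that hires nothing extends the history by a zero, which creates no event
theorem Dwin_append_zero (k : Int) (adds : List Int) :
    Dwin k (((adds ++ [0]).length : Int)) (adds ++ [(0 : Int)])
      = Dwin k ((adds.length : Int) + 1) adds := by
  simp only [Dwin, List.length_append, List.length_cons, List.length_nil, zero_add,
    List.range_succ, List.filterMap_append, List.filterMap_cons, List.filterMap_nil]
  have h0 : (adds ++ [(0 : Int)]).getD adds.length 0 = 0 := by simp
  rw [h0]
  simp only [lt_irrefl, and_false, if_false, List.append_nil]
  rw [show ((adds.length + 1 : Nat) : Int) = (adds.length : Int) + 1 by push_cast; ring]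
  apply List.filterMap_congr
  intro s hs
  rw [List.getD_append _ _ _ _ (List.mem_range.mp hs)]

theorem step_rel (m k p : Int) (hk : 1 ≤ k) (adds : List Int) (hnn : ∀ x ∈ adds, 0 ≤ x)
    (ansB : Int) :
    ∃ adds', adds'.length = adds.length + 1 ∧
      BRel k adds'
        (stepA m k (((adds.reverse ++ List.replicate k.toNat 0).take k.toNat, k.toNat), ansB) p)
        (stepB m k (PySem.Dict.mk (Dwin k (adds.length : Int) adds),
            ((adds.reverse ++ List.replicate k.toNat 0).take k.toNat).sum, ansB)
          ((adds.length : Int), p)) := by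
  have hK1 : 1 ≤ k.toNat := by omega
  have hKlt : k.toNat - 1 < (adds.reverse ++ List.replicate k.toNat (0 : Int)).length := by
    simp; omega
  have hlenw : ((adds.reverse ++ List.replicate k.toNat (0 : Int)).take k.toNat).length
      = k.toNat := by simp
  have hdrop : ((adds.reverse ++ List.replicate k.toNat (0 : Int)).take k.toNat).dropLast
      = (adds.reverse ++ List.replicate k.toNat (0 : Int)).take (k.toNat - 1) := by
    rw [List.dropLast_eq_take, hlenw, List.take_take]
    congr 1
    omega
  have hdq : dqAppend ((adds.reverse ++ List.replicate k.toNat (0 : Int)).take k.toNat, k.toNat) 0 k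
      = (0 :: (adds.reverse ++ List.replicate k.toNat (0 : Int)).take (k.toNat - 1), k.toNat) := by
    rw [dqAppend, if_neg (by simp only []; omega)]
    rw [hdrop]
  have htake : (adds.reverse ++ List.replicate k.toNat (0 : Int)).take k.toNat
      = (adds.reverse ++ List.replicate k.toNat (0 : Int)).take (k.toNat - 1)
        ++ [(adds.reverse ++ List.replicate k.toNat (0 : Int))[k.toNat - 1]'hKlt] :=
    take_concat_getElem _ _ hK1 hKlt
  have hsplit : ((adds.reverse ++ List.replicate k.toNat (0 : Int)).take k.toNat).sum
      = ((adds.reverse ++ List.replicate k.toNat (0 : Int)).take (k.toNat - 1)).sum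
        + (adds.reverse ++ List.replicate k.toNat (0 : Int))[k.toNat - 1]'hKlt := by
    rw [htake, List.sum_append, List.sum_cons, List.sum_nil, add_zero]
  have hgd := getD_Dwin k hk adds hnn
  -- B's active count after the pop = the sum of the k-1 surviving window entries
  have hsum : ((adds.reverse ++ List.replicate k.toNat 0).take k.toNat).sum
        - (PySem.Dict.mk (Dwin k (adds.length : Int) adds)).getD (adds.length : Int) 0
      = ((adds.reverse ++ List.replicate k.toNat (0 : Int)).take (k.toNat - 1)).sum := by
    rw [hgd]
    by_cases hik : ((adds.length : Int)) ≥ k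
    · have hget : PySem.List.pyGetD adds ((adds.length : Int) - k) 0
          = adds[((adds.length : Int) - k).toNat]'(by omega) := by
        rw [PySem.List.pyGetD_eq_getElem adds 0 (by omega) (by omega)]
      have hfi : (adds.reverse ++ List.replicate k.toNat (0 : Int))[k.toNat - 1]'hKlt
          = adds[((adds.length : Int) - k).toNat]'(by omega) := by
        rw [List.getElem_append_left (by simp; omega)]
        rw [List.getElem_reverse]
        congr 1
        omega
      rw [if_pos hik, hget, hsplit, hfi]; ring
    · have hfi : (adds.reverse ++ List.replicate k.toNat (0 : Int))[k.toNat - 1]'hKlt = 0 := by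
        rw [List.getElem_append_right (by simp; omega)]
        simp
      rw [if_neg hik, hsplit, hfi]; ring
  have hL' : ∀ v : Int,
      ((adds ++ [v]).reverse ++ List.replicate k.toNat (0 : Int)).take k.toNat
        = v :: (adds.reverse ++ List.replicate k.toNat (0 : Int)).take (k.toNat - 1) := by
    intro v
    rw [List.reverse_append, List.reverse_singleton, List.singleton_append, List.cons_append]
    exact take_cons_pred v _ _ hK1
  simp only [stepA, stepB, hdq, foldl_add_eq_sum, hsum, List.sum_cons, zero_add]
  by_cases hc : PySem.Int.floordiv p m
      - ((adds.reverse ++ List.replicate k.toNat (0 : Int)).take (k.toNat - 1)).sum > 0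
  · refine ⟨adds ++ [PySem.Int.floordiv p m
      - ((adds.reverse ++ List.replicate k.toNat (0 : Int)).take (k.toNat - 1)).sum], by simp, ?_⟩
    rw [if_pos (by omega), if_pos hc]
    refine ⟨?_, ?_, rfl, ?_, ?_, rfl⟩
    · intro x hx
      rcases List.mem_append.mp hx with h | h
      · exact hnn x h
      · have : x = _ := List.mem_singleton.mp h
        omega
    · show _ :: List.tail _ = _
      rw [List.tail_cons, hL']
    · show PySem.Dict.insert _ _ _ = _
      rw [erase_Dwin, insert_Dwin k hk adds _ hc]
    · simp only [List.tail_cons, List.sum_cons]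
      ring
  · refine ⟨adds ++ [0], by simp, ?_⟩
    rw [if_neg (by omega), if_neg hc]
    refine ⟨?_, ?_, rfl, ?_, ?_, rfl⟩
    · intro x hx
      rcases List.mem_append.mp hx with h | h
      · exact hnn x h
      · have : x = _ := List.mem_singleton.mp h
        omega
    · show _ = List.take _ _
      rw [hL']
    · show PySem.Dict.erase _ _ = _
      rw [erase_Dwin]
      exact congrArg PySem.Dict.mk (Dwin_append_zero k adds).symm
    · simp only [List.sum_cons]
      ring

theorem fold_rel (m k : Int) (hk : 1 ≤ k) :
    ∀ (players : List Int) (adds : List Int) (stA : (List Int × Nat) × Int)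
      (stB : PySem.Dict Int Int × Int × Int), BRel k adds stA stB →
      ∃ adds', BRel k adds' (players.foldl (stepA m k) stA)
        ((PySem.List.enumerate players ((adds.length : Int))).foldl (stepB m k) stB) := by
  intro players
  induction players with
  | nil => intro adds stA stB h; exact ⟨adds, by simpa [PySem.List.enumerate_nil] using h⟩
  | cons p ps ih =>
    rintro adds ⟨⟨w, c⟩, ansA⟩ ⟨d, act, ansB⟩ ⟨hnn, hw, hc, hd, hs, ha⟩
    dsimp only at hnn hw hc hd hs ha
    subst hw hc hd ha
    subst hs
    rw [PySem.List.enumerate_cons, List.foldl_cons, List.foldl_cons]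
    obtain ⟨adds', hlen, hrel⟩ := step_rel m k p hk adds hnn ansA
    have := ih adds' _ _ hrel
    rw [hlen] at this
    exact this

-- ===== VERDICT (by name: the statement is the Claim_ definition above) =====
theorem solution_spec : Claim_equal_solution := by
  intro players m k _hdom hpre
  obtain ⟨hm, hk⟩ := hpre
  show solution players m k = solution_alt players m k
  unfold solution solution_alt
  have hinit : (PySem.List.pyRange 0 k 1).foldl (fun w _ => dqAppend w 0 k) ([], 0)
      = (List.replicate k.toNat 0, k.toNat) := by
    rw [show (([], 0) : List Int × Nat) = (([] : List Int), ([] : List Int).length) from rfl]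
    rw [init_window k _ [] (by simp [PySem.List.length_pyRange_one])]
    simp [PySem.List.length_pyRange_one]
  rw [hinit]
  have h0 : BRel k [] ((List.replicate k.toNat 0, k.toNat), 0) (PySem.Dict.mk [], 0, 0) := by
    refine ⟨by simp, by simp, rfl, by simp [Dwin], by simp [List.sum_replicate], rfl⟩
  obtain ⟨adds', hrel⟩ := fold_rel m k hk players [] _ _ h0
  simpa using hrel.2.2.2.2.2
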